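-- pv_equiv track=rewrite | github.com/svercillo/LeetcodeAlgorithms | easy/Latin Square.py | solve
-- ===== SOURCE A (Python) =====
-- def solve(matrix):
--     chars = set()
--
--     n = len(matrix)
--
--
--
--
--     for i in range(n):
--         row = set()
--         for j in range(n):
--             row.add(matrix[i][j])
--
--             chars.add(matrix[i][j])
--         if len(row) < n:
--             return False
--
--     if len(chars) != n:
--         return False
--
--     for j in range(n):
--         col = set()
--         for i in range(n):
--             col.add(matrix[i][j])
--
--         if len(col) < n:
--             return False
--
--     return True
-- ===== SOURCE B (Python) =====
-- def solve(matrix):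
--     n = len(matrix)
--     symbols = sorted({v for row in matrix for v in row[:n]})
--     if len(symbols) != n:
--         return False
--     for i in range(n):
--         if sorted(matrix[i][j] for j in range(n)) != symbols:
--             return False
--     for j in range(n):
--         if sorted(matrix[i][j] for i in range(n)) != symbols:
--             return False
--     return True
-- ===== Notes on version B (the rewrite author's own statement) =====
-- stated objective: alternative
-- what changed: B replaces A's three set-cardinality counting loops by a canonical-form comparison: it computes symbols = sorted(set of all entries) once and then checks that every row and every column, sorted, equals that single reference list; no per-row/per-column sets or cardinality checks remain.
import Mathlib
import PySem

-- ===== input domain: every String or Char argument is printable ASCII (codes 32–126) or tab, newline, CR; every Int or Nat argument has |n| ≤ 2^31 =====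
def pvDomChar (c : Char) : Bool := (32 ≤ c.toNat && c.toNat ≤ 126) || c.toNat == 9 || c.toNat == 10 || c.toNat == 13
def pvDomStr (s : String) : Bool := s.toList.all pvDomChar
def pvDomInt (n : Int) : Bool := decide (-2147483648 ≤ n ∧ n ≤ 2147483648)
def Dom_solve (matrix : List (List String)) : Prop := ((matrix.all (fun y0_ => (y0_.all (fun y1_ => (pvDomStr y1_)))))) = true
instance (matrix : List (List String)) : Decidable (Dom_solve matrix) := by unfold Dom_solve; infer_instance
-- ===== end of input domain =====

-- B checks Latin-squareness by a different algorithm: it computes the single canonical list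
-- symbols = sorted(set of all entries) once and compares every sorted row and sorted column
-- against it, instead of A's per-row/per-column set-cardinality counting (objective: alternative).

-- matrix[i][j] (both Pythons index exactly like this; in-range under Pre_solve)
def pvIdx (matrix : List (List String)) (i j : Int) : String :=
  PySem.List.pyGetD (PySem.List.pyGetD matrix i []) j ""

-- ===== PORT A =====
-- inner 'for j in range(n): row.add(matrix[i][j]); chars.add(matrix[i][j])'
def pvAInner (matrix : List (List String)) (i : Int) (js : List Int)
    (row chars : PySem.Set String) : PySem.Set String × PySem.Set String :=
  match js with
  | [] => (row, chars)
  | j :: rest =>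
      pvAInner matrix i rest (PySem.Set.add row (pvIdx matrix i j))
        (PySem.Set.add chars (pvIdx matrix i j))

-- 'for i in range(n): row = set(); …; if len(row) < n: return False'  (none = returned False)
def pvARows (matrix : List (List String)) (n : Int) (is : List Int)
    (chars : PySem.Set String) : Option (PySem.Set String) :=
  match is with
  | [] => some chars
  | i :: rest =>
      let p := pvAInner matrix i (PySem.List.pyRange 0 n 1) PySem.Set.empty chars
      if PySem.Set.len p.1 < n then none else pvARows matrix n rest p.2

-- 'for j in range(n): col = set(); for i in range(n): col.add(matrix[i][j]); if len(col) < n: return False'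
def pvACols (matrix : List (List String)) (n : Int) (js : List Int) : Bool :=
  match js with
  | [] => true
  | j :: rest =>
      let col := (PySem.List.pyRange 0 n 1).foldl
        (fun c i => PySem.Set.add c (pvIdx matrix i j)) PySem.Set.empty
      if PySem.Set.len col < n then false else pvACols matrix n rest

def solve (matrix : List (List String)) : Bool :=
  let n : Int := matrix.length
  match pvARows matrix n (PySem.List.pyRange 0 n 1) PySem.Set.empty with
  | none => false
  | some chars =>
      if PySem.Set.len chars ≠ n then false
      else pvACols matrix n (PySem.List.pyRange 0 n 1)

-- ===== PORT B =====
-- 'sorted({v for row in matrix for v in row[:n]})'  (sorted of a set, no key: order-safe)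
def pvBSymbols (matrix : List (List String)) (n : Int) : List String :=
  PySem.List.sorted
    (PySem.Set.ofList (matrix.flatMap (fun row => PySem.List.slice row none (some n))))
    (fun x => x) false

-- 'for i in range(n): if sorted(matrix[i][j] for j in range(n)) != symbols: return False'
def pvBRowsOK (matrix : List (List String)) (n : Int) (symbols : List String) : Bool :=
  (PySem.List.pyRange 0 n 1).all (fun i =>
    PySem.List.sorted ((PySem.List.pyRange 0 n 1).map (fun j => pvIdx matrix i j))
      (fun x => x) false == symbols)

-- 'for j in range(n): if sorted(matrix[i][j] for i in range(n)) != symbols: return False'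
def pvBColsOK (matrix : List (List String)) (n : Int) (symbols : List String) : Bool :=
  (PySem.List.pyRange 0 n 1).all (fun j =>
    PySem.List.sorted ((PySem.List.pyRange 0 n 1).map (fun i => pvIdx matrix i j))
      (fun x => x) false == symbols)

def solve_alt (matrix : List (List String)) : Bool :=
  let n : Int := matrix.length
  let symbols := pvBSymbols matrix n
  if (symbols.length : Int) ≠ n then false
  else if !pvBRowsOK matrix n symbols then false
  else pvBColsOK matrix n symbols

-- ===== PRECONDITION & SPEC =====
-- Pre_ is exactly where the Python A returns: either no row is shorter than n = len(matrix)
-- (no IndexError possible), or some row i with all rows 0..i of full length has a duplicate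
-- among its first n entries (A returns False at or before row i, before reaching a short row).
def Pre_solve (matrix : List (List String)) : Prop :=
  (∀ row ∈ matrix, matrix.length ≤ row.length) ∨
  (∃ i < matrix.length, (∀ k ≤ i, matrix.length ≤ (matrix.getD k []).length) ∧
    ¬ ((matrix.getD i []).take matrix.length).Nodup)
instance (matrix : List (List String)) : Decidable (Pre_solve matrix) := by
  unfold Pre_solve; infer_instance
def pvWitness_solve : List (List String) := [["a", "b"], ["b", "a"]]

def Spec_solve (matrix : List (List String)) (out : Bool) : Prop := out = solve_alt matrix
instance (matrix : List (List String)) (out : Bool) : Decidable (Spec_solve matrix out) := by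
  unfold Spec_solve; infer_instance

-- ===== CLAIM (what is proved, stated in full; the proofs are below) =====
def Claim_equal_solve : Prop :=
  ∀ (matrix : List (List String)), Dom_solve matrix → Pre_solve matrix →
    Spec_solve matrix (solve matrix)

-- ===== LEMMAS AND PROOFS =====

-- row i of the (first-n-columns) grid, as A and B both read it
def pvRow (matrix : List (List String)) (n i : Int) : List String :=
  (PySem.List.pyRange 0 n 1).map (fun j => pvIdx matrix i j)

-- column j of the grid
def pvCol (matrix : List (List String)) (n j : Int) : List String :=
  (PySem.List.pyRange 0 n 1).map (fun i => pvIdx matrix i j)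

-- all grid entries, row-major
def pvE (matrix : List (List String)) (n : Int) : List String :=
  (PySem.List.pyRange 0 n 1).flatMap (fun i => pvRow matrix n i)

-- the set of all grid entries (A's final chars)
def pvS (matrix : List (List String)) (n : Int) : PySem.Set String :=
  PySem.Set.ofList (pvE matrix n)

theorem pvAInner_eq (matrix : List (List String)) (i : Int) (js : List Int)
    (row chars : PySem.Set String) :
    pvAInner matrix i js row chars =
      (PySem.Set.update row (js.map (fun j => pvIdx matrix i j)),
       PySem.Set.update chars (js.map (fun j => pvIdx matrix i j))) := by
  induction js generalizing row chars with
  | nil => simp [pvAInner, PySem.Set.update]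
  | cons j rest ih =>
      simp [pvAInner, ih, PySem.Set.update_map_eq_foldl_add]

theorem pvARows_eq (matrix : List (List String)) (n : Int) (is : List Int)
    (chars : PySem.Set String) :
    pvARows matrix n is chars =
      if is.all (fun i => !(PySem.Set.len (PySem.Set.ofList (pvRow matrix n i)) < n))
      then some (is.foldl (fun c i => PySem.Set.update c (pvRow matrix n i)) chars)
      else none := by
  induction is generalizing chars with
  | nil => rfl
  | cons i rest ih =>
      have hrow : (pvAInner matrix i (PySem.List.pyRange 0 n 1) PySem.Set.empty chars) =
          (PySem.Set.ofList (pvRow matrix n i), PySem.Set.update chars (pvRow matrix n i)) := by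
        rw [pvAInner_eq]; rfl
      rw [pvARows, hrow]
      by_cases h : PySem.Set.len (PySem.Set.ofList (pvRow matrix n i)) < n
      · simp only [PySem.Set.len, List.all_cons] at h ⊢
        simp [h]
      · rw [if_neg h, ih]
        simp [PySem.Set.len, List.all_cons] at h ⊢
        simp [h]

theorem pvACols_eq_all (matrix : List (List String)) (n : Int) (js : List Int) :
    pvACols matrix n js =
      js.all (fun j => !(PySem.Set.len (PySem.Set.ofList (pvCol matrix n j)) < n)) := by
  induction js with
  | nil => rfl
  | cons j rest ih =>
      have hcol : (PySem.List.pyRange 0 n 1).foldl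
          (fun c i => PySem.Set.add c (pvIdx matrix i j)) PySem.Set.empty =
          PySem.Set.ofList (pvCol matrix n j) := by
        rw [← PySem.Set.update_map_eq_foldl_add]; rfl
      rw [pvACols, hcol, List.all_cons, ih]
      by_cases h : PySem.Set.len (PySem.Set.ofList (pvCol matrix n j)) < n
      · rw [if_pos h]
        simp only [PySem.Set.len] at h ⊢
        simp [h]
      · rw [if_neg h]
        simp only [PySem.Set.len] at h ⊢
        simp [h]

-- the chars accumulated over all rows is the set of all entries
theorem pvChars_eq (matrix : List (List String)) (n : Int) (is : List Int) :
    is.foldl (fun c i => PySem.Set.update c (pvRow matrix n i)) PySem.Set.empty =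
      PySem.Set.ofList (is.flatMap (fun i => pvRow matrix n i)) := by
  suffices h : ∀ (is : List Int) (xs : List String),
      is.foldl (fun c i => PySem.Set.update c (pvRow matrix n i)) (PySem.Set.ofList xs) =
        PySem.Set.ofList (xs ++ is.flatMap (fun i => pvRow matrix n i)) by
    simpa using h is []
  intro is
  induction is with
  | nil => simp
  | cons i rest ih =>
      intro xs
      rw [List.foldl_cons, ← PySem.Set.ofList_append, ih]
      simp

-- solve as a conjunction of the three counting conditions
theorem solve_eq_true_iff (matrix : List (List String)) :
    solve matrix = true ↔
      ((∀ i ∈ PySem.List.pyRange 0 (matrix.length : Int) 1,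
          ¬ PySem.Set.len (PySem.Set.ofList (pvRow matrix (matrix.length : Int) i)) <
            (matrix.length : Int)) ∧
       PySem.Set.len (pvS matrix (matrix.length : Int)) = (matrix.length : Int) ∧
       (∀ j ∈ PySem.List.pyRange 0 (matrix.length : Int) 1,
          ¬ PySem.Set.len (PySem.Set.ofList (pvCol matrix (matrix.length : Int) j)) <
            (matrix.length : Int))) := by
  have hSdef : pvS matrix (matrix.length : Int) =
      PySem.Set.ofList ((PySem.List.pyRange 0 (matrix.length : Int) 1).flatMap
        (fun i => pvRow matrix (matrix.length : Int) i)) := rfl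
  rw [solve]
  simp only [pvARows_eq, pvChars_eq, ← hSdef]
  by_cases hrows : ((PySem.List.pyRange 0 (matrix.length : Int) 1).all
      (fun i => !(decide (PySem.Set.len (PySem.Set.ofList
        (pvRow matrix (matrix.length : Int) i)) < (matrix.length : Int))))) = true
  · rw [if_pos hrows]
    have hR : ∀ i ∈ PySem.List.pyRange 0 (matrix.length : Int) 1,
        ¬ PySem.Set.len (PySem.Set.ofList (pvRow matrix (matrix.length : Int) i)) <
          (matrix.length : Int) := by
      simpa using hrows
    dsimp only
    by_cases hchars : PySem.Set.len (pvS matrix (matrix.length : Int)) = (matrix.length : Int)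
    · rw [if_neg (not_not_intro hchars), pvACols_eq_all]
      simp only [List.all_eq_true, Bool.not_eq_true', decide_eq_false_iff_not]
      tauto
    · rw [if_pos hchars]
      simp only [Bool.false_eq_true, false_iff]
      tauto
  · rw [if_neg hrows]
    have hR : ¬ ∀ i ∈ PySem.List.pyRange 0 (matrix.length : Int) 1,
        ¬ PySem.Set.len (PySem.Set.ofList (pvRow matrix (matrix.length : Int) i)) <
          (matrix.length : Int) := by
      intro hall
      apply hrows
      simpa using hall
    simp only [Bool.false_eq_true, false_iff]
    intro hcon
    exact hR hcon.1

-- solve_alt as a conjunction of the three comparison conditions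
theorem solve_alt_eq_true_iff (matrix : List (List String)) :
    solve_alt matrix = true ↔
      (((pvBSymbols matrix (matrix.length : Int)).length : Int) = (matrix.length : Int) ∧
       (∀ i ∈ PySem.List.pyRange 0 (matrix.length : Int) 1,
          PySem.List.sorted (pvRow matrix (matrix.length : Int) i) (fun x => x) false =
            pvBSymbols matrix (matrix.length : Int)) ∧
       (∀ j ∈ PySem.List.pyRange 0 (matrix.length : Int) 1,
          PySem.List.sorted (pvCol matrix (matrix.length : Int) j) (fun x => x) false =
            pvBSymbols matrix (matrix.length : Int))) := by
  rw [solve_alt]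
  by_cases hlen : ((pvBSymbols matrix (matrix.length : Int)).length : Int) =
      (matrix.length : Int)
  · simp only [if_neg (not_not_intro hlen)]
    by_cases hrows : pvBRowsOK matrix (matrix.length : Int)
        (pvBSymbols matrix (matrix.length : Int)) = true
    · rw [hrows]
      simp only [Bool.not_true, Bool.false_eq_true, if_false]
      rw [pvBRowsOK] at hrows
      simp only [List.all_eq_true, beq_iff_eq] at hrows
      rw [pvBColsOK]
      simp only [List.all_eq_true, beq_iff_eq]
      constructor
      · intro h; exact ⟨hlen, fun i hi => hrows i hi, fun j hj => h j hj⟩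
      · intro h; exact fun j hj => h.2.2 j hj
    · have hrows' : pvBRowsOK matrix (matrix.length : Int)
          (pvBSymbols matrix (matrix.length : Int)) = false := by
        simpa using hrows
      rw [hrows']
      simp only [Bool.not_false, if_true, Bool.false_eq_true, false_iff]
      rw [pvBRowsOK] at hrows'
      intro h
      have : (PySem.List.pyRange 0 (matrix.length : Int) 1).all (fun i =>
          PySem.List.sorted ((PySem.List.pyRange 0 (matrix.length : Int) 1).map
            (fun j => pvIdx matrix i j)) (fun x => x) false ==
              pvBSymbols matrix (matrix.length : Int)) = true := by
        simp only [List.all_eq_true, beq_iff_eq]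
        exact fun i hi => h.2.1 i hi
      rw [hrows'] at this
      exact Bool.false_ne_true this
  · rw [if_pos hlen]
    simp only [Bool.false_eq_true, false_iff]
    intro h
    exact hlen h.1

-- every element of row i (i in range) is a grid entry
theorem pvRow_subset (matrix : List (List String)) (n i : Int)
    (hi : i ∈ PySem.List.pyRange 0 n 1) :
    ∀ x ∈ pvRow matrix n i, x ∈ pvE matrix n := by
  intro x hx
  rw [pvE, List.mem_flatMap]
  exact ⟨i, hi, hx⟩

-- every element of column j (j in range) is a grid entry
theorem pvCol_subset (matrix : List (List String)) (n j : Int)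
    (hj : j ∈ PySem.List.pyRange 0 n 1) :
    ∀ x ∈ pvCol matrix n j, x ∈ pvE matrix n := by
  intro x hx
  rw [pvCol, List.mem_map] at hx
  obtain ⟨i, hi, rfl⟩ := hx
  apply pvRow_subset matrix n i hi
  rw [pvRow, List.mem_map]
  exact ⟨j, hj, rfl⟩

-- THE core fact: for a line l of the right length whose entries all lie in the full
-- symbol set S with |S| = l.length, "l has l.length distinct entries" (A's test) is
-- the same as "sorted l equals sorted S" (B's test).
theorem pvKey (l S : List String) (hS : S.Nodup) (hlen : l.length = S.length)
    (hsub : ∀ x ∈ l, x ∈ S) :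
    ((PySem.Set.ofList l).length = S.length ↔
      PySem.List.sorted l (fun x => x) false = PySem.List.sorted S (fun x => x) false) := by
  rw [PySem.List.sorted_id_eq_sorted_id_iff_perm]
  constructor
  · intro hcard
    have hsp : (PySem.Set.ofList l).Subperm l :=
      (PySem.Set.nodup_ofList l).subperm (fun x hx => (PySem.Set.mem_ofList l x).mp hx)
    have hperm1 : (PySem.Set.ofList l).Perm l :=
      hsp.perm_of_length_le (by omega)
    have hsp2 : (PySem.Set.ofList l).Subperm S :=
      (PySem.Set.nodup_ofList l).subperm
        (fun x hx => hsub x ((PySem.Set.mem_ofList l x).mp hx))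
    have hperm2 : (PySem.Set.ofList l).Perm S :=
      hsp2.perm_of_length_le (by omega)
    exact hperm1.symm.trans hperm2
  · intro hperm
    have hnd : l.Nodup := hperm.symm.nodup hS
    rw [PySem.Set.ofList_eq_self_of_nodup l hnd, hlen]

-- for a full-length row, what the ports read as row i is its first n real entries
theorem pvTakeRow (row : List String) (k : Nat) (hk : k ≤ row.length) :
    (PySem.List.pyRange 0 (k : Int) 1).map (fun j => PySem.List.pyGetD row j "") =
      row.take k := by
  induction k with
  | zero => simp [PySem.List.pyRange]
  | succ m ihm =>
      have hcast : ((m : Int) + 1) = ((m + 1 : Nat) : Int) := by push_cast; ring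
      rw [← hcast, PySem.List.pyRange_one_succ_right (by positivity), List.map_append,
        ihm (by omega), List.map_singleton,
        PySem.List.pyGetD_eq_getElem row "" (by positivity)
          (by exact_mod_cast (by omega : m < row.length))]
      rw [List.take_add_one, List.getElem?_eq_getElem (by omega)]
      simp

-- a list with a duplicate loses length when deduplicated
theorem pvOfList_lt (l : List String) (h : ¬ l.Nodup) :
    (PySem.Set.ofList l).length < l.length := by
  have hle := PySem.Set.length_ofList_le l
  rcases lt_or_eq_of_le hle with hlt | heq
  · exact hlt
  · exfalso
    have hsp : (PySem.Set.ofList l).Subperm l :=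
      (PySem.Set.nodup_ofList l).subperm (fun x hx => (PySem.Set.mem_ofList l x).mp hx)
    exact h ((hsp.perm_of_length_le (by omega)).nodup (PySem.Set.nodup_ofList l))

-- under Pre_, B's symbol set is exactly A's final chars set
theorem pvBSymbols_eq (matrix : List (List String)) (hpre : ∀ row ∈ matrix, matrix.length ≤ row.length) :
    pvBSymbols matrix (matrix.length : Int) =
      PySem.List.sorted (pvS matrix (matrix.length : Int)) (fun x => x) false := by
  have h1 : matrix.flatMap (fun row => PySem.List.slice row none (some (matrix.length : Int))) =
      matrix.flatMap (fun row => row.take matrix.length) :=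
    List.flatMap_congr (fun row _ => PySem.List.slice_to_natCast row matrix.length)
  have h2 : ∀ i ∈ PySem.List.pyRange 0 (matrix.length : Int) 1,
      pvRow matrix (matrix.length : Int) i =
        (PySem.List.pyGetD matrix i []).take matrix.length := by
    intro i hi
    rw [PySem.List.mem_pyRange_one] at hi
    rw [pvRow]
    set row := PySem.List.pyGetD matrix i [] with hrow
    have hmem : row ∈ matrix := by
      rw [hrow, PySem.List.pyGetD_eq_getElem matrix [] hi.1 hi.2]
      exact List.getElem_mem _
    have hle : matrix.length ≤ row.length := hpre row hmem
    exact pvTakeRow row matrix.length hle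
  have h3 : (PySem.List.pyRange 0 (matrix.length : Int) 1).map
      (fun i => PySem.List.pyGetD matrix i []) = matrix :=
    PySem.List.map_pyGetD_pyRange_zero' matrix []
  have h4 : pvE matrix (matrix.length : Int) =
      matrix.flatMap (fun row => row.take matrix.length) := by
    rw [pvE, List.flatMap_congr h2]
    calc List.flatMap (fun i => (PySem.List.pyGetD matrix i []).take matrix.length)
          (PySem.List.pyRange 0 (matrix.length : Int) 1)
        = List.flatMap (fun row => row.take matrix.length)
            ((PySem.List.pyRange 0 (matrix.length : Int) 1).map
              (fun i => PySem.List.pyGetD matrix i [])) := (List.flatMap_map _ _ _).symm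
      _ = List.flatMap (fun row => row.take matrix.length) matrix := by rw [h3]
  rw [pvBSymbols, pvS, h1, h4]

theorem solve_eq_alt_full (matrix : List (List String))
    (hpre : ∀ row ∈ matrix, matrix.length ≤ row.length) :
    solve matrix = solve_alt matrix := by
  rw [Bool.eq_iff_iff, solve_eq_true_iff, solve_alt_eq_true_iff,
    pvBSymbols_eq matrix hpre]
  have hSnd : (pvS matrix (matrix.length : Int)).Nodup := PySem.Set.nodup_ofList _
  have hlenS : PySem.Set.len (pvS matrix (matrix.length : Int)) =
      ((pvS matrix (matrix.length : Int)).length : Int) := rfl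
  have hsortlen : ((PySem.List.sorted (pvS matrix (matrix.length : Int))
      (fun x => x) false).length : Int) = ((pvS matrix (matrix.length : Int)).length : Int) := by
    rw [PySem.List.length_sorted]
  have hrlen : ∀ i, (pvRow matrix (matrix.length : Int) i).length = matrix.length := by
    intro i
    rw [pvRow, List.length_map, PySem.List.length_pyRange_one]; omega
  have hclen : ∀ j, (pvCol matrix (matrix.length : Int) j).length = matrix.length := by
    intro j
    rw [pvCol, List.length_map, PySem.List.length_pyRange_one]; omega
  constructor
  · rintro ⟨hrow, hchars, hcol⟩
    have hScard : (pvS matrix (matrix.length : Int)).length = matrix.length := by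
      rw [hlenS] at hchars; exact_mod_cast hchars
    refine ⟨by rw [hsortlen, hScard], ?_, ?_⟩
    · intro i hi
      have hk := pvKey (pvRow matrix (matrix.length : Int) i) _ hSnd
        (by rw [hrlen, hScard]) (fun x hx => (PySem.Set.mem_ofList _ x).mpr
          (pvRow_subset matrix _ i hi x hx))
      apply hk.mp
      have hle := PySem.Set.length_ofList_le (pvRow matrix (matrix.length : Int) i)
      have := hrow i hi
      rw [hScard]
      have hlt : ¬ ((PySem.Set.ofList (pvRow matrix (matrix.length : Int) i)).length : Int) <
          (matrix.length : Int) := this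
      rw [hrlen] at hle
      omega
    · intro j hj
      have hk := pvKey (pvCol matrix (matrix.length : Int) j) _ hSnd
        (by rw [hclen, hScard]) (fun x hx => (PySem.Set.mem_ofList _ x).mpr
          (pvCol_subset matrix _ j hj x hx))
      apply hk.mp
      have hle := PySem.Set.length_ofList_le (pvCol matrix (matrix.length : Int) j)
      have hlt : ¬ ((PySem.Set.ofList (pvCol matrix (matrix.length : Int) j)).length : Int) <
          (matrix.length : Int) := hcol j hj
      rw [hScard]
      rw [hclen] at hle
      omega
  · rintro ⟨hlen, hrow, hcol⟩
    have hScard : (pvS matrix (matrix.length : Int)).length = matrix.length := by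
      rw [hsortlen] at hlen; exact_mod_cast hlen
    refine ⟨?_, by rw [hlenS]; exact_mod_cast hScard, ?_⟩
    · intro i hi
      have hk := pvKey (pvRow matrix (matrix.length : Int) i) _ hSnd
        (by rw [hrlen, hScard]) (fun x hx => (PySem.Set.mem_ofList _ x).mpr
          (pvRow_subset matrix _ i hi x hx))
      have hcard := hk.mpr (hrow i hi)
      rw [hScard] at hcard
      simp only [not_lt, PySem.Set.len]
      exact_mod_cast Nat.le_of_eq hcard.symm
    · intro j hj
      have hk := pvKey (pvCol matrix (matrix.length : Int) j) _ hSnd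
        (by rw [hclen, hScard]) (fun x hx => (PySem.Set.mem_ofList _ x).mpr
          (pvCol_subset matrix _ j hj x hx))
      have hcard := hk.mpr (hcol j hj)
      rw [hScard] at hcard
      simp only [not_lt, PySem.Set.len]
      exact_mod_cast Nat.le_of_eq hcard.symm

-- on the duplicate-row part of Pre_ both programs answer False
theorem solve_eq_alt_dup (matrix : List (List String)) (i : Nat) (hi : i < matrix.length)
    (hfull : ∀ k ≤ i, matrix.length ≤ (matrix.getD k []).length)
    (hdup : ¬ ((matrix.getD i []).take matrix.length).Nodup) :
    solve matrix = solve_alt matrix := by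
  have hrowi : pvRow matrix (matrix.length : Int) (i : Int) =
      (matrix.getD i []).take matrix.length := by
    rw [pvRow]
    have hget : PySem.List.pyGetD matrix (i : Int) [] = matrix.getD i [] := by
      rw [PySem.List.pyGetD_eq_getElem matrix [] (by positivity) (by exact_mod_cast hi),
        List.getD_eq_getElem matrix [] hi]
      simp
    simp only [pvIdx, hget]
    exact pvTakeRow _ _ (hfull i le_rfl)
  have himem : (i : Int) ∈ PySem.List.pyRange 0 (matrix.length : Int) 1 :=
    PySem.List.mem_pyRange_one.mpr ⟨by positivity, by exact_mod_cast hi⟩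
  have htlen : ((matrix.getD i []).take matrix.length).length = matrix.length := by
    rw [List.length_take]
    exact Nat.min_eq_left (hfull i le_rfl)
  have hltN : (PySem.Set.ofList (pvRow matrix (matrix.length : Int) (i : Int))).length <
      matrix.length := by
    have h1 := pvOfList_lt _ hdup
    rw [htlen] at h1
    rw [hrowi]
    exact h1
  have hlt : PySem.Set.len (PySem.Set.ofList (pvRow matrix (matrix.length : Int) (i : Int))) <
      (matrix.length : Int) := by
    simp only [PySem.Set.len]
    exact_mod_cast hltN
  have hA : solve matrix = false := by
    have hallF : ((PySem.List.pyRange 0 (matrix.length : Int) 1).all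
        (fun k => !(decide (PySem.Set.len (PySem.Set.ofList
          (pvRow matrix (matrix.length : Int) k)) < (matrix.length : Int))))) = false :=
      List.all_eq_false.mpr ⟨(i : Int), himem, by simp [PySem.Set.len]; exact_mod_cast hltN⟩
    have hcnot : ¬ (((PySem.List.pyRange 0 (matrix.length : Int) 1).all
        (fun k => !(decide (PySem.Set.len (PySem.Set.ofList
          (pvRow matrix (matrix.length : Int) k)) < (matrix.length : Int))))) = true) := by
      rw [hallF]; exact Bool.false_ne_true
    rw [solve, pvARows_eq, if_neg hcnot]
  have hnd : (pvBSymbols matrix (matrix.length : Int)).Nodup := by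
    rw [pvBSymbols]
    exact (PySem.List.sorted_perm _ _ _).symm.nodup (PySem.Set.nodup_ofList _)
  have hB : solve_alt matrix = false := by
    rw [solve_alt]
    by_cases hlen : ((pvBSymbols matrix (matrix.length : Int)).length : Int) ≠
        (matrix.length : Int)
    · rw [if_pos hlen]
    · rw [if_neg hlen]
      have hrowsF : pvBRowsOK matrix (matrix.length : Int)
          (pvBSymbols matrix (matrix.length : Int)) = false := by
        rw [pvBRowsOK]
        apply List.all_eq_false.mpr
        refine ⟨(i : Int), himem, ?_⟩
        simp only [beq_iff_eq]
        intro heq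
        have hp1 : (PySem.List.sorted (pvRow matrix (matrix.length : Int) (i : Int))
            (fun x => x) false).Perm (pvRow matrix (matrix.length : Int) (i : Int)) :=
          PySem.List.sorted_perm _ _ _
        have heq' : PySem.List.sorted (pvRow matrix (matrix.length : Int) (i : Int))
            (fun x => x) false = pvBSymbols matrix (matrix.length : Int) := heq
        rw [heq'] at hp1
        exact hdup (hrowi ▸ hp1.nodup hnd)
      rw [hrowsF]
      simp
  rw [hA, hB]

theorem solve_eq_alt (matrix : List (List String)) (hpre : Pre_solve matrix) :
    solve matrix = solve_alt matrix := by
  rcases hpre with hfull | ⟨i, hi, hfullpre, hdup⟩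
  · exact solve_eq_alt_full matrix hfull
  · exact solve_eq_alt_dup matrix i hi hfullpre hdup

-- ===== VERDICT (by name: the statement is the Claim_ definition above) =====
theorem solve_spec : Claim_equal_solve := by
  intro matrix _ hpre
  unfold Spec_solve
  exact solve_eq_alt matrix hpre
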